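-- pv_equiv track=rewrite | github.com/kirillbk/yandex-algorithm-training | 2B/6/e.py | covered
-- ===== SOURCE A (Python) =====
-- def covered(x, length):
-- 	lines = 0
-- 	line_end = x[0] - 1
-- 	for point in x:
-- 		if point > line_end:
-- 			line_end = point + length
-- 			lines += 1
-- 	return lines
-- ===== SOURCE B (Python) =====
-- def covered(x, length):
--     lines = 0
--     rest = x
--     while rest:
--         start = rest[0]
--         lines += 1
--         rest = [p for p in rest[1:] if p > start + length]
--     return lines
-- ===== Notes on version B (the rewrite author's own statement) =====
-- stated objective: alternative
-- what changed: B iterates over segments instead of points: it takes the first remaining point as a segment start and rebuilds the remaining list by filtering out every point the new segment covers (a sieve), instead of A's single pass with a running line_end sentinel; it trades A's O(n) single pass for repeated list rebuilding. Pre_ restricts to nonempty lists and nonnegative segment length, the task's natural domain.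
-- outside the precondition, e.g. on covered([0, -1, -2], -2): A returns 3, B returns 2; on covered([], 0): A raises IndexError, B returns 0
import Mathlib
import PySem

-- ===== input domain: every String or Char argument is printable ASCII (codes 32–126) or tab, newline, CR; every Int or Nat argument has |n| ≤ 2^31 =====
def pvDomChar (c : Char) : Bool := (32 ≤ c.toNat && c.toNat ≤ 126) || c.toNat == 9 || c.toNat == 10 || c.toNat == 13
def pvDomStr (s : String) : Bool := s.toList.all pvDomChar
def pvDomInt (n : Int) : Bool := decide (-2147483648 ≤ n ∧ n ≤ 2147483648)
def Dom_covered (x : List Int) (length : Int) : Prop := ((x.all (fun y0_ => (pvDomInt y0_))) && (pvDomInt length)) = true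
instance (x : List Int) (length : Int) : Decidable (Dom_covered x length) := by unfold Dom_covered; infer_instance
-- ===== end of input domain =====

-- B counts segments by sieving: take the first remaining point as a segment start and
-- filter out every point it covers, instead of A's single pass with a line_end sentinel;
-- alternative decomposition (it trades A's O(n) pass for per-segment list rebuilding).


-- ===== PORT A =====
-- x[0] raises IndexError on []; Pre_covered excludes that, so the .getD 0 default is never hit inside Pre_.
def covered (x : List Int) (length : Int) : Int :=
  let line_end : Int := (PySem.List.pyGet? x 0).getD 0 - 1
  let st := x.foldl
    (fun (s : Int × Int) point => if point > s.2 then (s.1 + 1, point + length) else s)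
    (0, line_end)
  st.1

-- ===== PORT B =====
-- Source B's while loop: rest[0] starts a segment, the comprehension keeps the points it does not cover
def sieve (length : Int) : List Int → Int → Int
  | [], lines => lines
  | start :: rest, lines =>
      sieve length (rest.filter (fun p => decide (start + length < p))) (lines + 1)
termination_by l => l.length
decreasing_by
  have h1 := List.length_filter_le (fun p : {p // p ∈ rest} => decide (start + length < ↑p)) rest.attach
  simp at h1 ⊢
  omega

def covered_alt (x : List Int) (length : Int) : Int := sieve length x 0

-- ===== PRECONDITION & SPEC =====
-- Pre_ restricts to the task's natural domain — a nonempty point list and a nonnegative segment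
-- length: on [] A raises IndexError reading x[0], and with a negative length A's unconditional
-- line_end = point + length can shrink the covered end, a degenerate regime outside the
-- covering-segments task (see cites for an excluded input where A still returns).
def Pre_covered (x : List Int) (length : Int) : Prop := x ≠ [] ∧ 0 ≤ length
instance (x : List Int) (length : Int) : Decidable (Pre_covered x length) := by unfold Pre_covered; infer_instance
def pvWitness_covered : List Int × Int := ([1, 4, 5, 9], 2)

def Spec_covered (x : List Int) (length : Int) (out : Int) : Prop := out = covered_alt x length
instance (x : List Int) (length : Int) (out : Int) : Decidable (Spec_covered x length out) := by unfold Spec_covered; infer_instance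

-- ===== CLAIM (what is proved, stated in full; the proofs are below) =====
def Claim_equal_covered : Prop := ∀ (x : List Int) (length : Int), Dom_covered x length → Pre_covered x length → Spec_covered x length (covered x length)

-- ===== LEMMAS AND PROOFS =====

-- list-level intermediary for A: the greedy seen on suffix lists via dropWhile
def gBody (length : Int) : List Int → Int → Int
  | [], lines => lines
  | p :: rest, lines =>
      gBody length (rest.dropWhile (fun q => decide (q ≤ p + length))) (lines + 1)
termination_by l => l.length
decreasing_by
  have := List.length_dropWhile_le (fun q => decide (q ≤ p + length)) rest
  simp; omega

theorem fold_eq (length : Int) (l : List Int) (lines e : Int) :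
    (l.foldl
      (fun (s : Int × Int) point => if point > s.2 then (s.1 + 1, point + length) else s)
      (lines, e)).1
    = gBody length (l.dropWhile (fun p => decide (p ≤ e))) lines := by
  induction l generalizing lines e with
  | nil => simp [gBody]
  | cons p rest ih =>
      by_cases hp : p ≤ e
      · rw [List.foldl_cons, if_neg (show ¬ p > e by omega), ih,
          List.dropWhile_cons, if_pos (by simpa using hp)]
      · rw [List.foldl_cons, if_pos (show p > e by omega), ih]
        conv_rhs => rw [List.dropWhile_cons, if_neg (by simpa using hp), gBody]

-- a second filter by a higher threshold subsumes the first
theorem filter_filter_le (l : List Int) (e e' : Int) (h : e ≤ e') :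
    (l.filter (fun q => decide (e < q))).filter (fun q => decide (e' < q))
      = l.filter (fun q => decide (e' < q)) := by
  induction l with
  | nil => rfl
  | cons a t ih =>
      by_cases ha : e' < a
      · rw [List.filter_cons, if_pos (by simpa using show e < a by omega),
          List.filter_cons, if_pos (by simpa using ha), ih,
          List.filter_cons, if_pos (by simpa using ha)]
      · by_cases ha2 : e < a
        · rw [List.filter_cons, if_pos (by simpa using ha2),
            List.filter_cons, if_neg (by simpa using ha), ih,
            List.filter_cons, if_neg (by simpa using ha)]
        · rw [List.filter_cons, if_neg (by simpa using ha2), ih,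
            List.filter_cons, if_neg (by simpa using ha)]

-- core: A's dropWhile greedy and B's filter sieve agree, for nonnegative length
theorem gBody_eq_sieve (length : Int) (hlen : 0 ≤ length) (l : List Int) :
    ∀ (e lines : Int),
      gBody length (l.dropWhile (fun q => decide (q ≤ e))) lines
        = sieve length (l.filter (fun q => decide (e < q))) lines := by
  induction l with
  | nil => intro e lines; simp [gBody, sieve]
  | cons a t ih =>
      intro e lines
      by_cases ha : a ≤ e
      · rw [List.dropWhile_cons, if_pos (by simpa using ha),
          List.filter_cons, if_neg (by simpa using show ¬ e < a by omega)]
        exact ih e lines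
      · rw [List.dropWhile_cons, if_neg (by simpa using ha),
          List.filter_cons, if_pos (by simpa using show e < a by omega)]
        simp only [gBody, sieve]
        rw [filter_filter_le t e (a + length) (by omega)]
        exact ih (a + length) (lines + 1)

-- ===== VERDICT (by name: the statement is the Claim_ definition above) =====
theorem covered_spec : Claim_equal_covered := by
  intro x length hdom hpre
  obtain ⟨hne, hlen⟩ := hpre
  obtain ⟨h, t, rfl⟩ : ∃ h t, x = h :: t := by
    cases x with
    | nil => exact absurd rfl hne
    | cons a b => exact ⟨a, b, rfl⟩
  unfold Spec_covered covered covered_alt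
  have h0 : (PySem.List.pyGet? (h :: t) 0).getD 0 = h := by
    simp [PySem.List.pyGet?, PySem.List.pyIdx?]
  rw [fold_eq, h0, gBody_eq_sieve length hlen (h :: t) (h - 1) 0,
    List.filter_cons, if_pos (by simp)]
  simp only [sieve]
  rw [filter_filter_le t (h - 1) (h + length) (by omega)]
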